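-- pv_equiv track=rewrite | github.com/PK0497/EMS | etl/load.py | _parse_named_queries
-- ===== SOURCE A (Python) =====
-- def _parse_named_queries(sql: str) -> dict[str, str]:
--     """
--     Parse a SQL file that uses '-- name: <query_name>' section headers
--     into a {name: sql_string} mapping.
--
--     Each '-- name:' line introduces a new named block; the block ends
--     when the next '-- name:' header (or EOF) is reached. Blank lines
--     and other comment lines within a block are preserved.
--
--     Example input:
--         -- name: merge_geography
--         MERGE dim_geography AS tgt ...
--
--         -- name: merge_complaint
--         MERGE dim_dispatch_complaint AS tgt ...
--
--     Returns:
--         {"merge_geography": "MERGE dim_geography ...",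
--          "merge_complaint": "MERGE dim_dispatch_complaint ..."}
--     """
--     sections: dict[str, str] = {}
--     current_name: str | None = None
--     current_lines: list[str] = []
--
--     for line in sql.splitlines():
--         stripped = line.strip()
--         if stripped.startswith("-- name:"):
--             if current_name is not None:
--                 sections[current_name] = "\n".join(current_lines).strip()
--             current_name = stripped[len("-- name:"):].strip()
--             current_lines = []
--         else:
--             current_lines.append(line)
--
--     if current_name is not None:
--         sections[current_name] = "\n".join(current_lines).strip()
--
--     return sections
-- ===== SOURCE B (Python) =====
-- HEADER = "-- name:"
--
--
-- def _is_header(line):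
--     return line.strip().startswith(HEADER)
--
--
-- def _parse_named_queries(sql: str) -> dict[str, str]:
--     """Segment-based parse: drop the preamble before the first '-- name:'
--     header, then repeatedly slice off one (header, body) segment."""
--     lines = sql.splitlines()
--     rest = lines[next((k for k, l in enumerate(lines) if _is_header(l)), len(lines)):]
--     sections: dict[str, str] = {}
--     while rest:
--         head, tail = rest[0], rest[1:]
--         cut = next((k for k, l in enumerate(tail) if _is_header(l)), len(tail))
--         name = head.strip()[len(HEADER):].strip()
--         sections[name] = "\n".join(tail[:cut]).strip()
--         rest = tail[cut:]
--     return sections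
-- ===== Notes on version B (the rewrite author's own statement) =====
-- stated objective: alternative
-- what changed: A threads a (dict, current_name, current_lines) accumulator through one line-by-line loop with a final flush; B first drops the preamble up to the first '-- name:' header and then repeatedly slices off one whole header+body segment (first-header-index search plus list slicing / takeWhile-dropWhile), with no pending-section state.
import Mathlib
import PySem

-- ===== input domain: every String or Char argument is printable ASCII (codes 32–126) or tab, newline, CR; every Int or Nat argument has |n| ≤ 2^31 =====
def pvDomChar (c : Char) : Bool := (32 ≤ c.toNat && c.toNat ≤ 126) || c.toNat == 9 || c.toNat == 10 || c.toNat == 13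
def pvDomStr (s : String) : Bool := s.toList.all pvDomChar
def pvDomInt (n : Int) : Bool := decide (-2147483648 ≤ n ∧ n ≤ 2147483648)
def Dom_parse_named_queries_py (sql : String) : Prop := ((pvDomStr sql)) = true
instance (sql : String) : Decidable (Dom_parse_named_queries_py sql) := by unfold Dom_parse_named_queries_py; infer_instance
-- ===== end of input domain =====

-- B re-implements the accumulator loop as segment slicing (dropWhile to the first
-- header, then repeatedly take one header+body segment); same cost, different decomposition.

def pvHdr : String := "-- name:"

-- ===== PORT A =====
-- one step of A's for-loop over splitlines: state (sections, current_name, current_lines)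
def pvStepA (st : PySem.Dict String String × Option String × List String) (line : String) :
    PySem.Dict String String × Option String × List String :=
  let stripped := PySem.Str.strip line
  if PySem.Str.startswith stripped pvHdr then
    let sections :=
      match st.2.1 with
      | some n => st.1.insert n (PySem.Str.strip (PySem.Str.join "\n" st.2.2))
      | none => st.1
    (sections,
     some (PySem.Str.strip (PySem.Str.slice stripped (some (PySem.Str.len pvHdr)) none)),
     [])
  else
    (st.1, st.2.1, st.2.2 ++ [line])

def parse_named_queries_py (sql : String) : List (String × String) :=
  let st := (PySem.Str.splitlines sql).foldl pvStepA (PySem.Dict.empty, none, [])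
  (match st.2.1 with
   | some n => st.1.insert n (PySem.Str.strip (PySem.Str.join "\n" st.2.2))
   | none => st.1).items

-- ===== PORT B =====
def pvIsHeader (line : String) : Bool :=
  PySem.Str.startswith (PySem.Str.strip line) pvHdr

def pvNameOf (line : String) : String :=
  PySem.Str.strip (PySem.Str.slice (PySem.Str.strip line) (some (PySem.Str.len pvHdr)) none)

-- B's while loop: rest starts at a header line; slice off one (header, body) segment
-- (tail[:cut] / tail[cut:] with cut = first header index = takeWhile / dropWhile).
def pvParseB (sections : PySem.Dict String String) (rest : List String) :
    PySem.Dict String String :=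
  match rest with
  | [] => sections
  | head :: tail =>
      pvParseB
        (sections.insert (pvNameOf head)
          (PySem.Str.strip (PySem.Str.join "\n" (tail.takeWhile (fun l => !pvIsHeader l)))))
        (tail.dropWhile (fun l => !pvIsHeader l))
termination_by rest.length
decreasing_by
  simp only [List.length_cons]
  exact Nat.lt_succ_of_le (List.length_dropWhile_le _ _)

def parse_named_queries_py_alt (sql : String) : List (String × String) :=
  (pvParseB PySem.Dict.empty
    ((PySem.Str.splitlines sql).dropWhile (fun l => !pvIsHeader l))).items

-- ===== PRECONDITION & SPEC =====
def Spec_parse_named_queries_py (sql : String) (out : List (String × String)) : Prop := out = parse_named_queries_py_alt sql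
instance (sql : String) (out : List (String × String)) : Decidable (Spec_parse_named_queries_py sql out) := by unfold Spec_parse_named_queries_py; infer_instance

-- ===== CLAIM (what is proved, stated in full; the proofs are below) =====
def Claim_equal_parse_named_queries_py : Prop := ∀ (sql : String), Dom_parse_named_queries_py sql → Spec_parse_named_queries_py sql (parse_named_queries_py sql)

-- ===== LEMMAS AND PROOFS =====

-- A's final flush, as a function of the loop state
def pvFlush (st : PySem.Dict String String × Option String × List String) :
    PySem.Dict String String :=
  match st.2.1 with
  | some n => st.1.insert n (PySem.Str.strip (PySem.Str.join "\n" st.2.2))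
  | none => st.1

lemma pvFoldSome (ls : List String) :
    ∀ (d : PySem.Dict String String) (name : String) (cur : List String),
      pvFlush (ls.foldl pvStepA (d, some name, cur)) =
      pvParseB
        (d.insert name
          (PySem.Str.strip (PySem.Str.join "\n" (cur ++ ls.takeWhile (fun l => !pvIsHeader l)))))
        (ls.dropWhile (fun l => !pvIsHeader l)) := by
  induction ls with
  | nil => intro d name cur; simp [pvFlush, pvParseB]
  | cons x xs ih =>
      intro d name cur
      by_cases h : pvIsHeader x = true
      · have h' : PySem.Str.startswith (PySem.Str.strip x) pvHdr = true := h
        simp only [List.foldl_cons, pvStepA, h', List.takeWhile_cons,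
          List.dropWhile_cons, h, Bool.not_true, if_true]
        rw [ih]
        simp [pvParseB, pvNameOf]
      · have h' : PySem.Str.startswith (PySem.Str.strip x) pvHdr = false :=
          by simpa [pvIsHeader] using h
        simp only [List.foldl_cons, pvStepA, h', List.takeWhile_cons,
          List.dropWhile_cons, h, Bool.not_false, Bool.false_eq_true, if_false]
        rw [ih]
        simp

lemma pvFoldNone (ls : List String) :
    ∀ (d : PySem.Dict String String) (cur : List String),
      pvFlush (ls.foldl pvStepA (d, none, cur)) =
      pvParseB d (ls.dropWhile (fun l => !pvIsHeader l)) := by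
  induction ls with
  | nil => intro d cur; simp [pvFlush, pvParseB]
  | cons x xs ih =>
      intro d cur
      by_cases h : pvIsHeader x = true
      · have h' : PySem.Str.startswith (PySem.Str.strip x) pvHdr = true := h
        simp only [List.foldl_cons, pvStepA, h', List.dropWhile_cons, h,
          Bool.not_true, if_true]
        rw [pvFoldSome]
        simp [pvParseB, pvNameOf]
      · have h' : PySem.Str.startswith (PySem.Str.strip x) pvHdr = false :=
          by simpa [pvIsHeader] using h
        simp only [List.foldl_cons, pvStepA, h', List.dropWhile_cons, h,
          Bool.not_false, Bool.false_eq_true, if_false]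
        exact ih d (cur ++ [x])

-- ===== VERDICT (by name: the statement is the Claim_ definition above) =====
theorem parse_named_queries_py_spec : Claim_equal_parse_named_queries_py := by
  intro sql _
  unfold Spec_parse_named_queries_py parse_named_queries_py parse_named_queries_py_alt
  have := pvFoldNone (PySem.Str.splitlines sql) PySem.Dict.empty []
  simp only [pvFlush] at this
  rw [← this]
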